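-- pv_equiv track=rewrite | github.com/WayneLambert/portfolio | countdown_letters/logic.py | get_shortlisted_words
-- ===== SOURCE A (Python) =====
-- def get_shortlisted_words(words: tuple, letters: str) -> dict:
--     """
--     Given a tuple of words and a string of the game's letters, returns
--     a shortlist of the accumulatively gathered longest words in the
--     running order of cycling through `words.txt`
--     """
--     shortlisted_words = {}
--     cumulative_max_letter_count = 0
--     letters_in_selection = list(letters)
--     for tested_word in words:
--         letters_in_tested_word = list(tested_word.upper())
--         if len(letters_in_tested_word) < len(letters_in_selection):
--             common_letters = set(letters_in_selection).intersection(
--                 letters_in_tested_word)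
--             letter_count = len(common_letters)
--             if letter_count >= cumulative_max_letter_count and len(
--                     tested_word) == len(common_letters):
--                 cumulative_max_letter_count = letter_count
--                 shortlisted_words[tested_word] = cumulative_max_letter_count
--     return shortlisted_words
-- ===== SOURCE B (Python) =====
-- def _fits(letters: str, w: str) -> bool:
--     """w is a candidate: shorter than the selection, and every letter of its
--     upper-casing occurs in the selection and exactly once in the word."""
--     wu = list(w.upper())
--     return len(wu) < len(letters) and all(
--         c in letters and wu.count(c) == 1 for c in wu)
--
--
-- def get_shortlisted_words(words: tuple, letters: str) -> dict:
--     """Stateless formulation: a candidate is shortlisted exactly when no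
--     earlier candidate is strictly longer (a non-strict prefix record), so the
--     result is a dict comprehension over the candidate list with a dominance
--     test against the preceding slice -- no running maximum is kept."""
--     cands = [w for w in words if _fits(letters, w)]
--     return {w: len(w)
--             for i, w in enumerate(cands)
--             if all(len(v) <= len(w) for v in cands[:i])}
-- ===== Notes on version B (the rewrite author's own statement) =====
-- stated objective: alternative
-- what changed: A's single stateful loop (a fresh set(letters) built and intersected per word, plus a running-max accumulator with incremental dict inserts) is replaced by a stateless formulation: a count-based candidacy test (every letter occurs in the selection and exactly once in the word, no sets built) and a dict comprehension shortlisting a candidate exactly when no earlier candidate in the list is strictly longer (dominance test against the preceding slice, no running maximum).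
import Mathlib
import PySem

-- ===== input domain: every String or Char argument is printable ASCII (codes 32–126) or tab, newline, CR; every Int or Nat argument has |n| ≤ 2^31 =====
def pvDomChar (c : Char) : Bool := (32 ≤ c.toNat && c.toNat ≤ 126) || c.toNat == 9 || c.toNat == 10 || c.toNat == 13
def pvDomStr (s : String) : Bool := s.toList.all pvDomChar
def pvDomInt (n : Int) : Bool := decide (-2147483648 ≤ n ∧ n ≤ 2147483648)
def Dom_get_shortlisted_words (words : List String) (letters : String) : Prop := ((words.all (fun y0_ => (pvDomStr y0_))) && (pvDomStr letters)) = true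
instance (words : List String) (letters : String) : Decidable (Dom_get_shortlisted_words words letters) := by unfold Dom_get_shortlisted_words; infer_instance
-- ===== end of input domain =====

-- B replaces A's stateful loop (set-intersection count + running-max accumulator) by a stateless
-- formulation: a count-based candidacy test, then a dict comprehension that shortlists a candidate
-- exactly when no earlier candidate is strictly longer (dominance test against the preceding slice).

-- ===== PORT A =====
def get_shortlisted_words (words : List String) (letters : String) : List (String × Int) :=
  let letters_in_selection := letters.toList
  let final := words.foldl
    (fun (st : PySem.Dict String Int × Nat) tested_word =>
      let letters_in_tested_word := PySem.Chars.upper tested_word.toList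
      if letters_in_tested_word.length < letters_in_selection.length then
        let common_letters :=
          PySem.Set.inter (PySem.Set.ofList letters_in_selection) letters_in_tested_word
        let letter_count := common_letters.length
        if letter_count ≥ st.2 ∧ tested_word.toList.length = letter_count then
          (st.1.insert tested_word ((letter_count : Nat) : Int), letter_count)
        else st
      else st)
    (PySem.Dict.empty, 0)
  final.1.items

-- ===== PORT B =====
-- candidacy test of Source B: shorter than the selection, and every letter of the upper-cased word
-- occurs in the selection (single-char 'c in letters') and exactly once in the word
def pvFits (letters w : String) : Bool :=
  let wu := PySem.Chars.upper w.toList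
  decide (wu.length < letters.toList.length)
    && wu.all (fun c => letters.toList.contains c && (PySem.List.count wu c == 1))

def get_shortlisted_words_alt (words : List String) (letters : String) : List (String × Int) :=
  let cands := words.filter (fun w => pvFits letters w)
  ((PySem.List.enumerate cands 0).foldl
    (fun (d : PySem.Dict String Int) iw =>
      -- cands[:i] with i = iw.1 ≥ 0 is 'take'; all(len(v) <= len(w) …) is the dominance test
      if (cands.take iw.1.toNat).all (fun v => decide (v.toList.length ≤ iw.2.toList.length)) then
        d.insert iw.2 ((iw.2.toList.length : Nat) : Int)
      else d)
    PySem.Dict.empty).items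

-- ===== PRECONDITION & SPEC =====
def Spec_get_shortlisted_words (words : List String) (letters : String) (out : List (String × Int)) : Prop := out = get_shortlisted_words_alt words letters
instance (words : List String) (letters : String) (out : List (String × Int)) : Decidable (Spec_get_shortlisted_words words letters out) := by unfold Spec_get_shortlisted_words; infer_instance

-- ===== CLAIM (what is proved, stated in full; the proofs are below) =====
def Claim_equal_get_shortlisted_words : Prop := ∀ (words : List String) (letters : String), Dom_get_shortlisted_words words letters → Spec_get_shortlisted_words words letters (get_shortlisted_words words letters)

-- ===== LEMMAS AND PROOFS =====

lemma upper_length (l : List Char) : (PySem.Chars.upper l).length = l.length :=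
  List.length_map ..

-- the intersection count equals len(w) exactly when w's distinct upper letters are a subset of
-- the selection and are len(w)-many (A's quirk: a repeated letter disqualifies the word)
lemma count_key (letters w : List Char) :
    ((PySem.Set.ofList letters).inter (PySem.Chars.upper w)).length = w.length
    ↔ (PySem.Set.issubset (PySem.Set.ofList (PySem.Chars.upper w)) (PySem.Set.ofList letters) = true
       ∧ (PySem.Set.ofList (PySem.Chars.upper w)).length = w.length) := by
  set sel := PySem.Set.ofList letters with hseldef
  set l := PySem.Chars.upper w with hldef
  set u := PySem.Set.ofList l with hudef
  have hlen : l.length = w.length := upper_length w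
  have hsel : sel.Nodup := PySem.Set.nodup_ofList letters
  have hu : u.Nodup := PySem.Set.nodup_ofList l
  have hperm : (sel.inter l).Perm (u.filter (fun x => sel.contains x)) := by
    rw [List.perm_ext_iff_of_nodup (PySem.Set.nodup_inter sel l hsel) (hu.filter _)]
    intro a
    simp only [PySem.Set.mem_inter, List.mem_filter, PySem.Set.contains_iff]
    constructor
    · rintro ⟨h1, h2⟩; exact ⟨(PySem.Set.mem_ofList l a).mpr h2, h1⟩
    · rintro ⟨h1, h2⟩; exact ⟨h2, (PySem.Set.mem_ofList l a).mp h1⟩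
  have hclen : (sel.inter l).length = (u.filter (fun x => sel.contains x)).length :=
    hperm.length_eq
  have hule : u.length ≤ w.length := hlen ▸ PySem.Set.length_ofList_le l
  have hfle : (u.filter (fun x => sel.contains x)).length ≤ u.length :=
    List.length_filter_le (fun x => sel.contains x) u
  rw [hclen, PySem.Set.issubset_iff]
  constructor
  · intro h
    have hueq : u.length = w.length := le_antisymm hule (by omega)
    have hfle2 : (u.filter (fun x => sel.contains x)).length = u.length := by omega
    have hall : ∀ a ∈ u, sel.contains a = true :=
      (List.length_filter_eq_length_iff (p := fun x => sel.contains x) (l := u)).mp hfle2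
    exact ⟨fun x hx => (PySem.Set.contains_iff sel x).mp (hall x hx), hueq⟩
  · rintro ⟨hsub, hueq⟩
    have : u.filter (fun x => sel.contains x) = u :=
      List.filter_eq_self.mpr (fun a ha => (PySem.Set.contains_iff sel a).mpr (hsub a ha))
    rw [this, hueq]

-- (PySem.Set.ofList l).length = l.length ↔ l has no duplicates
lemma ofList_length_iff (l : List Char) :
    (PySem.Set.ofList l).length = l.length ↔ l.Nodup := by
  have hperm : (PySem.Set.ofList l).Perm l.dedup := by
    rw [List.perm_ext_iff_of_nodup (PySem.Set.nodup_ofList l) (List.nodup_dedup l)]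
    intro a
    rw [PySem.Set.mem_ofList, List.mem_dedup]
  rw [hperm.length_eq]
  constructor
  · intro h
    have hs := List.dedup_sublist l
    have := hs.eq_of_length h
    rw [← this]
    exact List.nodup_dedup l
  · intro h
    rw [List.dedup_eq_self.mpr h]

-- B's candidacy test ↔ A's guard pair
lemma fits_iff (letters w : String) :
    pvFits letters w = true
    ↔ ((PySem.Chars.upper w.toList).length < letters.toList.length
       ∧ ((PySem.Set.ofList letters.toList).inter (PySem.Chars.upper w.toList)).length
           = w.toList.length) := by
  set wu := PySem.Chars.upper w.toList with hwu
  have hlen : wu.length = w.toList.length := List.length_map ..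
  rw [count_key letters.toList w.toList, ← hwu]
  simp only [pvFits, ← hwu, Bool.and_eq_true, decide_eq_true_eq, List.all_eq_true,
    beq_iff_eq, PySem.List.count_eq]
  constructor
  · rintro ⟨h1, h2⟩
    refine ⟨h1, ?_, ?_⟩
    · rw [PySem.Set.issubset_iff]
      intro x hx
      rw [PySem.Set.mem_ofList] at hx ⊢
      exact List.contains_iff_mem.mp ((h2 x hx).1)
    · rw [← hlen, ofList_length_iff]
      exact List.nodup_iff_count_eq_one.mpr (fun a ha => (h2 a ha).2)
  · rintro ⟨h1, h2, h3⟩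
    refine ⟨h1, fun c hc => ⟨?_, ?_⟩⟩
    · rw [PySem.Set.issubset_iff] at h2
      have := h2 c ((PySem.Set.mem_ofList wu c).mpr hc)
      exact List.contains_iff_mem.mpr ((PySem.Set.mem_ofList letters.toList c).mp this)
    · rw [← hlen, ofList_length_iff] at h3
      exact List.nodup_iff_count_eq_one.mp h3 c hc

-- A's loop over words = A's simplified step over the pvFits-filtered words
lemma step_eq (letters w : String) (st : PySem.Dict String Int × Nat) :
    (let letters_in_tested_word := PySem.Chars.upper w.toList
     if letters_in_tested_word.length < letters.toList.length then
       let common_letters :=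
         PySem.Set.inter (PySem.Set.ofList letters.toList) letters_in_tested_word
       let letter_count := common_letters.length
       if letter_count ≥ st.2 ∧ w.toList.length = letter_count then
         (st.1.insert w ((letter_count : Nat) : Int), letter_count)
       else st
     else st)
    = if pvFits letters w = true then
        (if st.2 ≤ w.toList.length then
          (st.1.insert w ((w.toList.length : Nat) : Int), w.toList.length)
         else st)
      else st := by
  simp only []
  by_cases hf : pvFits letters w = true
  · obtain ⟨h1, h2⟩ := (fits_iff letters w).mp hf
    rw [if_pos h1, if_pos hf, h2]
    by_cases hc : st.2 ≤ w.toList.length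
    · rw [if_pos ⟨hc, rfl⟩, if_pos hc]
    · rw [if_neg (fun h => hc h.1), if_neg hc]
  · rw [if_neg hf]
    by_cases h1 : (PySem.Chars.upper w.toList).length < letters.toList.length
    · rw [if_pos h1, if_neg]
      rintro ⟨-, h2⟩
      exact hf ((fits_iff letters w).mpr ⟨h1, h2.symm⟩)
    · rw [if_neg h1]

-- the running-max fold over the candidate list equals the dominance-test fold of B
lemma loop_eq : ∀ (l p : List String) (d : PySem.Dict String Int) (m : Nat),
    (∀ k, m ≤ k ↔ ∀ v ∈ p, v.toList.length ≤ k) →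
    (l.foldl
      (fun (st : PySem.Dict String Int × Nat) w =>
        if st.2 ≤ w.toList.length then
          (st.1.insert w ((w.toList.length : Nat) : Int), w.toList.length)
        else st) (d, m)).1
    = (PySem.List.enumerate l (p.length : Int)).foldl
        (fun (d : PySem.Dict String Int) iw =>
          if ((p ++ l).take iw.1.toNat).all
              (fun v => decide (v.toList.length ≤ iw.2.toList.length)) then
            d.insert iw.2 ((iw.2.toList.length : Nat) : Int)
          else d) d
  | [], p, d, m, hinv => by
      simp [PySem.List.enumerate_nil]
  | w :: t, p, d, m, hinv => by
      rw [PySem.List.enumerate_cons, List.foldl_cons, List.foldl_cons]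
      have htake : ((p ++ w :: t).take ((p.length : Int)).toNat) = p := by
        rw [Int.toNat_natCast, List.take_left]
      have hcond : (((p ++ w :: t).take ((p.length : Int)).toNat).all
          (fun v => decide (v.toList.length ≤ w.toList.length)))
          = decide (m ≤ w.toList.length) := by
        rw [htake]
        by_cases hm : m ≤ w.toList.length
        · simp only [hm, decide_true]
          exact List.all_eq_true.mpr (fun v hv => decide_eq_true ((hinv _).mp hm v hv))
        · simp only [hm, decide_false]
          rw [List.all_eq_false]
          have : ¬ ∀ v ∈ p, v.toList.length ≤ w.toList.length := fun h => hm ((hinv _).mpr h)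
          push Not at this
          obtain ⟨v, hv, hlt⟩ := this
          exact ⟨v, hv, by simpa using hlt⟩
      rw [hcond]
      have hrest : (p ++ w :: t) = (p ++ [w]) ++ t := by
        rw [List.append_cons]
      have hlen1 : ((p.length : Int) + 1) = (((p ++ [w]).length : Int)) := by
        simp
      by_cases hm : m ≤ w.toList.length
      · simp only [hm, decide_true, if_true]
        rw [hrest, hlen1]
        exact loop_eq t (p ++ [w]) _ _ (by
          intro k
          constructor
          · intro hk v hv
            rcases List.mem_append.mp hv with h | h
            · exact (hinv _).mp (le_trans hm hk) v h
            · simp only [List.mem_singleton] at h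
              exact h ▸ hk
          · intro h
            exact h w (by simp))
      · simp only [hm, decide_false, if_false]
        rw [hrest, hlen1]
        exact loop_eq t (p ++ [w]) _ _ (by
          intro k
          constructor
          · intro hk v hv
            rcases List.mem_append.mp hv with h | h
            · exact (hinv _).mp hk v h
            · simp only [List.mem_singleton] at h
              subst h
              exact le_trans ((Nat.lt_of_not_le hm).le) hk
          · intro h
            exact (hinv _).mpr (fun v hv => h v (List.mem_append_left _ hv)))

-- ===== VERDICT (by name: the statement is the Claim_ definition above) =====
theorem get_shortlisted_words_spec : Claim_equal_get_shortlisted_words := by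
  unfold Claim_equal_get_shortlisted_words
  intro words letters _
  unfold Spec_get_shortlisted_words
  simp only [get_shortlisted_words, get_shortlisted_words_alt]
  rw [show (fun (st : PySem.Dict String Int × Nat) tested_word =>
      let letters_in_tested_word := PySem.Chars.upper tested_word.toList
      if letters_in_tested_word.length < letters.toList.length then
        let common_letters :=
          PySem.Set.inter (PySem.Set.ofList letters.toList) letters_in_tested_word
        let letter_count := common_letters.length
        if letter_count ≥ st.2 ∧ tested_word.toList.length = letter_count then
          (st.1.insert tested_word ((letter_count : Nat) : Int), letter_count)
        else st
      else st)
      = (fun (st : PySem.Dict String Int × Nat) w =>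
          if pvFits letters w = true then
            (if st.2 ≤ w.toList.length then
              (st.1.insert w ((w.toList.length : Nat) : Int), w.toList.length)
             else st)
          else st)
    from funext fun st => funext fun w => step_eq letters w st]
  rw [PySem.List.foldl_ite_eq_foldl_filter]
  have hfilter : words.filter (fun w => decide (pvFits letters w = true))
      = words.filter (fun w => pvFits letters w) := by
    simp
  rw [hfilter]
  congr 1
  have := loop_eq (words.filter (fun w => pvFits letters w)) [] PySem.Dict.empty 0
    (by intro k; simp)
  simpa using this
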